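-- pv_equiv track=rewrite | github.com/kyroos/CCC2023_Rock_Paper_Scissors | src/2023_Level3.py | solve
-- ===== SOURCE A (Python) =====
-- rules = {
--     "PP": "P",
--     "RR": "R",
--     "SS": "S",
--     "PS": "S", "SP": "S",
--     "PR": "P", "RP": "P",
--     "RS": "R", "SR": "R"
-- }
--
-- def fight(pair):
--     return rules["".join(pair)]
--
-- def do_two_rounds(fights):
--     for _ in range(2):
--         fights = "".join(fight(pair) for pair in zip(fights[::2], fights[1::2]))
--     return fights
--
-- def solve(R, P, S):
--     ans = ""
--     while R >= 3 and P >= 1: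
--         ans += "RRRP"
--         R -= 3
--         P -= 1
--
--     while R >= 1 and P >= 1:
--         ans += "RP"
--         R -= 1
--         P -= 1
--
--     assert R <= 1
--
--     if R == 1:
--         assert S >= 1
--         ans += "RS"
--         R -= 1
--         S -= 1
--
--     ans += "P" * P + "S" * S
--
--     assert do_two_rounds(ans).count("R") == 0
--     assert do_two_rounds(ans).count("S") >= 1
--
--     return ans
-- ===== SOURCE B (Python) =====
-- rules = {
--     "PP": "P",
--     "RR": "R",
--     "SS": "S",
--     "PS": "S", "SP": "S",
--     "PR": "P", "RP": "P",
--     "RS": "R", "SR": "R"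
-- }
--
-- def fight(pair):
--     return rules["".join(pair)]
--
-- def do_two_rounds(fights):
--     for _ in range(2):
--         fights = "".join(fight(pair) for pair in zip(fights[::2], fights[1::2]))
--     return fights
--
-- def solve(R, P, S):
--     # closed-form iteration counts instead of the two while-loops
--     k1 = min(R // 3, P) if R >= 3 and P >= 1 else 0
--     R -= 3 * k1
--     P -= k1
--     k2 = min(R, P) if R >= 1 and P >= 1 else 0
--     R -= k2
--     P -= k2
--     ans = "RRRP" * k1 + "RP" * k2
--
--     assert R <= 1
--
--     if R == 1:
--         assert S >= 1
--         ans += "RS"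
--         R -= 1
--         S -= 1
--
--     ans += "P" * P + "S" * S
--
--     assert do_two_rounds(ans).count("R") == 0
--     assert do_two_rounds(ans).count("S") >= 1
--
--     return ans
-- ===== Notes on version B (the rewrite author's own statement) =====
-- stated objective: faster
-- what changed: Replaces A's two while-loops by closed-form iteration counts (k1 = min(R//3, P), k2 = min(R, P)) and builds the arrangement by string repetition in one step, keeping the R==1 fixup, the tail and the asserts; the excluded inputs are exactly those where an assert raises AssertionError in both A and B.
import Mathlib
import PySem

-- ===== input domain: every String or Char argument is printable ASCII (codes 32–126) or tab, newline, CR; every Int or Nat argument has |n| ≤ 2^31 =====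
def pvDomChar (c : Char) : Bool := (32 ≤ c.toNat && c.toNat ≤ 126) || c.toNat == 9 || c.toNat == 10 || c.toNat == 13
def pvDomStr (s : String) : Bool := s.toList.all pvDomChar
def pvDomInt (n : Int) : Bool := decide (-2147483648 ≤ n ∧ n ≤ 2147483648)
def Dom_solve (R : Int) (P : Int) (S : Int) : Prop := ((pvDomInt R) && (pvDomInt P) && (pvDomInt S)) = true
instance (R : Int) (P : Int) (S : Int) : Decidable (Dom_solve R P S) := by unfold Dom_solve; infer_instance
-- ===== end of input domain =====

-- B replaces A's two while-loops by closed-form iteration counts (min/floordiv arithmetic); same return value.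

-- ===== PORT A =====
-- "s" * n for an Int count (Python: negative count gives ""): shared by both ports, both Pythons use `*`.
def pyRep (cs : List Char) (n : Int) : List Char := (List.replicate n.toNat cs).flatten

-- while R >= 3 and P >= 1: ans += "RRRP"; R -= 3; P -= 1
def solveLoop1 (ans : List Char) (R P : Int) : List Char × Int × Int :=
  if 3 ≤ R ∧ 1 ≤ P then solveLoop1 (ans ++ ['R','R','R','P']) (R - 3) (P - 1)
  else (ans, R, P)
termination_by R.toNat
decreasing_by omega

-- while R >= 1 and P >= 1: ans += "RP"; R -= 1; P -= 1
def solveLoop2 (ans : List Char) (R P : Int) : List Char × Int × Int :=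
  if 1 ≤ R ∧ 1 ≤ P then solveLoop2 (ans ++ ['R','P']) (R - 1) (P - 1)
  else (ans, R, P)
termination_by R.toNat
decreasing_by omega

def solve (R : Int) (P : Int) (S : Int) : String :=
  let t1 := solveLoop1 [] R P
  let t2 := solveLoop2 t1.1 t1.2.1 t1.2.2
  -- assert R <= 1  (Pre_solve admits only inputs on which every assert passes)
  let t3 := if t2.2.1 = 1 then (t2.1 ++ ['R','S'], t2.2.1 - 1, S - 1) else (t2.1, t2.2.1, S)
  -- ans += "P" * P + "S" * S; the two do_two_rounds asserts pass under Pre_solve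
  String.ofList (t3.1 ++ pyRep ['P'] t2.2.2 ++ pyRep ['S'] t3.2.2)

-- ===== PORT B =====
def solve_alt (R : Int) (P : Int) (S : Int) : String :=
  let k1 := if 3 ≤ R ∧ 1 ≤ P then min (PySem.Int.floordiv R 3) P else 0
  let R1 := R - 3 * k1
  let P1 := P - k1
  let k2 := if 1 ≤ R1 ∧ 1 ≤ P1 then min R1 P1 else 0
  let R2 := R1 - k2
  let P2 := P1 - k2
  let ans := pyRep ['R','R','R','P'] k1 ++ pyRep ['R','P'] k2
  -- assert R <= 1  (Pre_solve admits only inputs on which every assert passes)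
  let t3 := if R2 = 1 then (ans ++ ['R','S'], R2 - 1, S - 1) else (ans, R2, S)
  String.ofList (t3.1 ++ pyRep ['P'] P2 ++ pyRep ['S'] t3.2.2)

-- ===== PRECONDITION & SPEC =====
-- Pre_solve holds exactly where A returns normally; it excludes the inputs on which one of A's
-- four asserts raises AssertionError (B raises there too), stated as closed-form arithmetic.
def Pre_solve (R : Int) (P : Int) (S : Int) : Prop :=
  let k1 := if 3 ≤ R ∧ 1 ≤ P then min (PySem.Int.floordiv R 3) P else 0
  let R1 := R - 3 * k1
  let P1 := P - k1
  let k2 := if 1 ≤ R1 ∧ 1 ≤ P1 then min R1 P1 else 0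
  let R2 := R1 - k2
  let P2 := P1 - k2
  let fix : Int := if R2 = 1 then 1 else 0
  let p := max P2 0
  let sp := max (S - fix) 0
  let q := PySem.Int.floordiv p 2
  let s1 := PySem.Int.floordiv (p + sp) 2 - q
  R2 ≤ 1 ∧ (R2 = 1 → 1 ≤ S) ∧
  ¬(fix = 1 ∧ PySem.Int.mod k2 2 = 0 ∧ q = 0) ∧
  (if PySem.Int.mod (k2 + fix + q) 2 = 0 then 2 ≤ s1 else 1 ≤ s1)
instance (R : Int) (P : Int) (S : Int) : Decidable (Pre_solve R P S) := by
  unfold Pre_solve; infer_instance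

def pvWitness_solve : Int × Int × Int := (0, 0, 4)

def Spec_solve (R : Int) (P : Int) (S : Int) (out : String) : Prop := out = solve_alt R P S
instance (R : Int) (P : Int) (S : Int) (out : String) : Decidable (Spec_solve R P S out) := by unfold Spec_solve; infer_instance

-- ===== CLAIM (what is proved, stated in full; the proofs are below) =====
def Claim_equal_solve : Prop := ∀ (R : Int) (P : Int) (S : Int), Dom_solve R P S → Pre_solve R P S → Spec_solve R P S (solve R P S)

-- ===== LEMMAS AND PROOFS =====

theorem pyRep_succ (cs : List Char) (k : Int) (hk : 0 ≤ k) :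
    pyRep cs (k + 1) = cs ++ pyRep cs k := by
  have : (k + 1).toNat = k.toNat + 1 := by omega
  simp [pyRep, this, List.replicate_succ]

theorem loop1_eq (ans : List Char) (R P : Int) :
    solveLoop1 ans R P =
      (ans ++ pyRep ['R','R','R','P'] (if 3 ≤ R ∧ 1 ≤ P then min (PySem.Int.floordiv R 3) P else 0),
       R - 3 * (if 3 ≤ R ∧ 1 ≤ P then min (PySem.Int.floordiv R 3) P else 0),
       P - (if 3 ≤ R ∧ 1 ≤ P then min (PySem.Int.floordiv R 3) P else 0)) := by
  fun_induction solveLoop1 ans R P with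
  | case1 ans R P h ih =>
      have h3 : PySem.Int.floordiv R 3 = R / 3 := PySem.Int.floordiv_eq_ediv_of_pos (by omega)
      have h3' : PySem.Int.floordiv (R - 3) 3 = (R - 3) / 3 :=
        PySem.Int.floordiv_eq_ediv_of_pos (by omega)
      set k' : Int := if 3 ≤ R - 3 ∧ 1 ≤ P - 1 then min (PySem.Int.floordiv (R - 3) 3) (P - 1) else 0 with hk'
      have hk'0 : 0 ≤ k' := by rw [hk']; split_ifs with h2 <;> [rw [h3']; skip] <;> omega
      have hks : k' + 1 = min (PySem.Int.floordiv R 3) P := by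
        rw [hk', h3]; split_ifs with h2 <;> [rw [h3']; skip] <;> omega
      rw [ih, if_pos h, ← hks]
      simp only [Prod.mk.injEq]
      refine ⟨?_, by omega, by omega⟩
      rw [pyRep_succ _ _ hk'0, List.append_assoc]
  | case2 ans R P h =>
      rw [if_neg h]
      simp [pyRep]

theorem loop2_eq (ans : List Char) (R P : Int) :
    solveLoop2 ans R P =
      (ans ++ pyRep ['R','P'] (if 1 ≤ R ∧ 1 ≤ P then min R P else 0),
       R - (if 1 ≤ R ∧ 1 ≤ P then min R P else 0),
       P - (if 1 ≤ R ∧ 1 ≤ P then min R P else 0)) := by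
  fun_induction solveLoop2 ans R P with
  | case1 ans R P h ih =>
      set k' : Int := if 1 ≤ R - 1 ∧ 1 ≤ P - 1 then min (R - 1) (P - 1) else 0 with hk'
      have hk'0 : 0 ≤ k' := by rw [hk']; split_ifs <;> omega
      have hks : k' + 1 = min R P := by rw [hk']; split_ifs <;> omega
      rw [ih, if_pos h, ← hks]
      simp only [Prod.mk.injEq]
      refine ⟨?_, by omega, by omega⟩
      rw [pyRep_succ _ _ hk'0, List.append_assoc]
  | case2 ans R P h =>
      rw [if_neg h]
      simp [pyRep]

theorem solve_eq_alt (R P S : Int) : solve R P S = solve_alt R P S := by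
  unfold solve solve_alt
  simp only [loop1_eq, loop2_eq, List.nil_append, List.append_assoc]

-- ===== VERDICT (by name: the statement is the Claim_ definition above) =====
theorem solve_spec : Claim_equal_solve := by
  intro R P S _ _
  unfold Spec_solve
  exact solve_eq_alt R P S
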